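-- pv_equiv track=rewrite | github.com/yongchoooon/tradar | app/services/synonym_service.py | _mix_languages
-- ===== SOURCE A (Python) =====
-- from typing import Iterable, List
--
-- def _mix_languages(
--     latin: List[str], hangul: List[str], limit: int
-- ) -> List[str]:
--     result: List[str] = []
--     idx_lat = idx_han = 0
--     while len(result) < limit and (idx_lat < len(latin) or idx_han < len(hangul)):
--         if idx_lat < len(latin):
--             result.append(latin[idx_lat])
--             idx_lat += 1
--         if len(result) < limit and idx_han < len(hangul):
--             result.append(hangul[idx_han])
--             idx_han += 1
--
--     remainder = latin[idx_lat:] + hangul[idx_han:]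
--     for item in remainder:
--         if len(result) >= limit:
--             break
--         result.append(item)
--     return result[:limit]
-- ===== SOURCE B (Python) =====
-- from typing import List
--
-- def _mix_languages(latin: List[str], hangul: List[str], limit: int) -> List[str]:
--     merged: List[str] = []
--     for a, b in zip(latin, hangul):
--         merged += [a, b]
--     n = min(len(latin), len(hangul))
--     merged += latin[n:] + hangul[n:]
--     return merged[:limit]
-- ===== Notes on version B (the rewrite author's own statement) =====
-- stated objective: simpler
-- what changed: Builds the full interleaving once via zip plus the leftover tails and slices it to the limit, instead of a two-pointer while loop with per-append limit checks and a remainder loop; Pre_ excludes negative limits, a nonsensical corner where A's while-guard happens to yield [] while a plain Python slice keeps all but the last elements.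
-- outside the precondition, e.g. on _mix_languages(['a'], ['b'], -1): A returns [], B returns ['a']
import Mathlib
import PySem

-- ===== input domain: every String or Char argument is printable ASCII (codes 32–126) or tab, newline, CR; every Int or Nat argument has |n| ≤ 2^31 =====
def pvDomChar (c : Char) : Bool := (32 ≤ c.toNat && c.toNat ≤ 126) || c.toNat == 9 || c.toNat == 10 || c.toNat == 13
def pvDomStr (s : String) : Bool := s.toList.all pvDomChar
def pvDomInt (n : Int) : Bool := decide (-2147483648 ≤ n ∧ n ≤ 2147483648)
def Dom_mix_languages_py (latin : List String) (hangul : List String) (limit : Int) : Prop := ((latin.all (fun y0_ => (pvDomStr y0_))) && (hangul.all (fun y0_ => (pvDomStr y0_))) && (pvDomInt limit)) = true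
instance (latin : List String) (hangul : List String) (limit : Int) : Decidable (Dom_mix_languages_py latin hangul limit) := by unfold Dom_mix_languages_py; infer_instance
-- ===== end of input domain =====

-- B builds the whole interleaving once (zip + leftover tails) and slices it to the limit,
-- instead of A's two-pointer while loop with per-append limit checks; objective: simpler.

-- ===== PORT A =====
-- the while loop: state (result, idx_lat, idx_han); terminates because each
-- iteration under the guard advances idx_lat or idx_han
def mixLoopA (latin hangul : List String) (limit : Int) (result : List String)
    (il ih : Nat) : List String × Nat × Nat :=
  if hguard : (result.length : Int) < limit ∧ (il < latin.length ∨ ih < hangul.length) then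
    if hl : il < latin.length then
      -- first if fires: append latin[il]; then the second if on the grown result
      if h2 : ((result ++ [latin[il]]).length : Int) < limit ∧ ih < hangul.length then
        mixLoopA latin hangul limit (result ++ [latin[il]] ++ [hangul[ih]'h2.2]) (il + 1) (ih + 1)
      else
        mixLoopA latin hangul limit (result ++ [latin[il]]) (il + 1) ih
    else
      -- first if skipped; second if on the unchanged result
      if h2 : (result.length : Int) < limit ∧ ih < hangul.length then
        mixLoopA latin hangul limit (result ++ [hangul[ih]'h2.2]) il (ih + 1)
      else
        mixLoopA latin hangul limit result il ih   -- unreachable: hguard ∧ ¬hl force h2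
  else (result, il, ih)
termination_by (latin.length - il) + (hangul.length - ih)
decreasing_by all_goals (simp_all <;> omega)

-- 'for item in remainder: if len(result) >= limit: break; result.append(item)'
def mixRemA (limit : Int) (result : List String) : List String → List String
  | [] => result
  | x :: xs =>
    if (result.length : Int) ≥ limit then result
    else mixRemA limit (result ++ [x]) xs

def mix_languages_py (latin : List String) (hangul : List String) (limit : Int) : List String :=
  let st := mixLoopA latin hangul limit [] 0 0
  -- latin[idx_lat:] + hangul[idx_han:]  (indices are the loop's Nat counters, so drop is exact)
  let remainder := latin.drop st.2.1 ++ hangul.drop st.2.2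
  let result := mixRemA limit st.1 remainder
  PySem.List.slice result none (some limit)   -- result[:limit]

-- ===== PORT B =====
def mix_languages_py_alt (latin : List String) (hangul : List String) (limit : Int) : List String :=
  let merged := (latin.zip hangul).foldl (fun acc p => acc ++ [p.1, p.2]) []
  let n := min latin.length hangul.length
  let merged := merged ++ (latin.drop n ++ hangul.drop n)
  PySem.List.slice merged none (some limit)   -- merged[:limit]

-- ===== PRECONDITION & SPEC =====
-- Pre_ excludes negative limits (A still returns [] there): a nonsensical corner where
-- A's while-guard value and B's Python negative-slice value are both implementation artefacts.
def Pre_mix_languages_py (latin : List String) (hangul : List String) (limit : Int) : Prop :=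
  0 ≤ limit
instance (latin : List String) (hangul : List String) (limit : Int) : Decidable (Pre_mix_languages_py latin hangul limit) := by unfold Pre_mix_languages_py; infer_instance

def pvWitness_mix_languages_py : List String × List String × Int := (["ab", "cd"], ["ga"], 2)

def Spec_mix_languages_py (latin : List String) (hangul : List String) (limit : Int) (out : List String) : Prop := out = mix_languages_py_alt latin hangul limit
instance (latin : List String) (hangul : List String) (limit : Int) (out : List String) : Decidable (Spec_mix_languages_py latin hangul limit out) := by unfold Spec_mix_languages_py; infer_instance

-- ===== CLAIM (what is proved, stated in full; the proofs are below) =====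
def Claim_equal_mix_languages_py : Prop := ∀ (latin : List String) (hangul : List String) (limit : Int), Dom_mix_languages_py latin hangul limit → Pre_mix_languages_py latin hangul limit → Spec_mix_languages_py latin hangul limit (mix_languages_py latin hangul limit)

-- ===== LEMMAS AND PROOFS =====

-- alternating interleave: first element of xs, then swap roles
def ilv : List String → List String → List String
  | [], ys => ys
  | x :: xs, ys => x :: ilv ys xs
termination_by xs ys => xs.length + ys.length
decreasing_by simp; omega

theorem ilv_nil (xs : List String) : ilv xs [] = xs := by
  cases xs <;> simp [ilv]

theorem ilv_cons_cons (x y : String) (xs ys : List String) :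
    ilv (x :: xs) (y :: ys) = x :: y :: ilv xs ys := by
  simp [ilv]

theorem mixRemA_take (limit : Int) (rem : List String) :
    ∀ result : List String,
      (mixRemA limit result rem).take limit.toNat = (result ++ rem).take limit.toNat := by
  induction rem with
  | nil => intro result; simp [mixRemA]
  | cons x xs ih =>
    intro result
    by_cases h : (result.length : Int) ≥ limit
    · have ht : limit.toNat ≤ result.length := by omega
      simp [mixRemA, h, List.take_append_of_le_length ht]
    · simp only [mixRemA, if_neg h]
      rw [ih]
      simp

theorem mixLoopA_main (latin hangul : List String) (limit : Int) :
    ∀ result il ih,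
      (mixRemA limit (mixLoopA latin hangul limit result il ih).1
          (latin.drop (mixLoopA latin hangul limit result il ih).2.1 ++
           hangul.drop (mixLoopA latin hangul limit result il ih).2.2)).take limit.toNat
        = (result ++ ilv (latin.drop il) (hangul.drop ih)).take limit.toNat := by
  intro result il ih
  fun_induction mixLoopA latin hangul limit result il ih with
  | case1 result il ih hguard hl h2 ihrec =>
    -- latin and hangul both appended
    rw [ihrec]
    rw [List.drop_eq_getElem_cons hl, List.drop_eq_getElem_cons h2.2, ilv_cons_cons]
    simp
  | case2 result il ih hguard hl h2 ihrec =>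
    -- only latin appended; second condition failed
    rw [ihrec]
    rw [List.drop_eq_getElem_cons hl]
    rcases Decidable.not_and_iff_not_or_not.mp h2 with hlim | hhn
    · -- limit reached after the latin append: take cuts inside result ++ [latin[il]]
      have ht : limit.toNat ≤ (result ++ [latin[il]]).length := by
        simp at hlim ⊢; omega
      rw [List.take_append_of_le_length ht]
      have hre : result ++ latin[il] :: ilv (hangul.drop ih) (latin.drop (il + 1))
          = (result ++ [latin[il]]) ++ ilv (hangul.drop ih) (latin.drop (il + 1)) := by simp
      simp only [ilv, hre, List.take_append_of_le_length ht]
    · -- hangul exhausted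
      have hh0 : hangul.drop ih = [] := List.drop_eq_nil_of_le (by omega)
      rw [hh0]
      simp [ilv_nil]
  | case3 result il ih hguard hl h2 ihrec =>
    -- latin exhausted; hangul appended
    rw [ihrec]
    have hl0 : latin.drop il = [] := List.drop_eq_nil_of_le (by omega)
    rw [hl0, List.drop_eq_getElem_cons h2.2]
    simp [ilv]
  | case4 result il ih hguard hl h2 ihrec =>
    -- unreachable: contradiction from the guard
    exact absurd ⟨hguard.1, hguard.2.resolve_left hl⟩ h2
  | case5 result il ih hguard =>
    simp only
    rcases Decidable.not_and_iff_not_or_not.mp hguard with hlim | hidx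
    · -- result already has length ≥ limit: everything after it is cut by take
      have ht : limit.toNat ≤ result.length := by omega
      rw [mixRemA_take]
      rw [List.take_append_of_le_length ht, List.take_append_of_le_length ht]
    · -- both lists exhausted: drops are empty
      have h1 : latin.drop il = [] := List.drop_eq_nil_of_le (by omega)
      have h2 : hangul.drop ih = [] := List.drop_eq_nil_of_le (by omega)
      rw [h1, h2]
      simp [mixRemA, ilv]

theorem foldl_zip_ilv (xs : List String) :
    ∀ (ys : List String) (acc : List String),
      (xs.zip ys).foldl (fun acc p => acc ++ [p.1, p.2]) acc ++
        (xs.drop (min xs.length ys.length) ++ ys.drop (min xs.length ys.length))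
      = acc ++ ilv xs ys := by
  induction xs with
  | nil => intro ys acc; simp [ilv]
  | cons x xs ihx =>
    intro ys acc
    cases ys with
    | nil => simp [ilv_nil]
    | cons y ys =>
      simp only [List.zip_cons_cons, List.foldl_cons, ilv_cons_cons]
      have : min (x :: xs).length (y :: ys).length = min xs.length ys.length + 1 := by
        simp [Nat.succ_min_succ]
      rw [this]
      simp only [List.drop_succ_cons]
      rw [ihx ys (acc ++ [x, y])]
      simp

theorem alt_eq_take (latin hangul : List String) (limit : Int) (h : 0 ≤ limit) :
    mix_languages_py_alt latin hangul limit = (ilv latin hangul).take limit.toNat := by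
  unfold mix_languages_py_alt
  rw [PySem.List.slice_to _ h]
  rw [foldl_zip_ilv latin hangul []]
  simp

-- ===== VERDICT (by name: the statement is the Claim_ definition above) =====
theorem mix_languages_py_spec : Claim_equal_mix_languages_py := by
  intro latin hangul limit _ hpre
  unfold Spec_mix_languages_py mix_languages_py
  rw [alt_eq_take _ _ _ hpre]
  rw [PySem.List.slice_to _ hpre]
  have := mixLoopA_main latin hangul limit [] 0 0
  simp only [List.drop_zero, List.nil_append] at this
  exact this
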